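-- pv_equiv track=rewrite | github.com/sed3saaho/Romans-codility-Practice | Tuesdays-content/Question1.py | solution
-- ===== SOURCE A (Python) =====
-- def solution(R, V, N):
--     current_balance_A = 0
--     current_balance_B = 0
--     min_balance_A = 0
--     min_balance_B = 0
--
--     for i in range(N):
--         if R[i] == 'A':
--             current_balance_A += V[i]
--             current_balance_B -= V[i]
--         else:  # R[i] == 'B'
--             current_balance_B += V[i]
--             current_balance_A -= V[i]
--
--         if current_balance_A < min_balance_A:
--             min_balance_A = current_balance_A
--         if current_balance_B < min_balance_B:
--             min_balance_B = current_balance_B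
--
--     initial_balance_A = max(0, -min_balance_A)
--     initial_balance_B = max(0, -min_balance_B)
--
--     return [initial_balance_A, initial_balance_B]
-- ===== SOURCE B (Python) =====
-- def solution(R, V, N):
--     bal = [0]
--     for i in range(N):
--         bal.append(bal[-1] + (V[i] if R[i] == 'A' else -V[i]))
--     return [-min(bal), max(bal)]
-- ===== Notes on version B (the rewrite author's own statement) =====
-- stated objective: simpler
-- what changed: Replaces the two mirrored running balances with two inline minimum updates by one prefix-balance list (balance_B is always -balance_A) whose min/max give both answers directly via the builtins.
import Mathlib
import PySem

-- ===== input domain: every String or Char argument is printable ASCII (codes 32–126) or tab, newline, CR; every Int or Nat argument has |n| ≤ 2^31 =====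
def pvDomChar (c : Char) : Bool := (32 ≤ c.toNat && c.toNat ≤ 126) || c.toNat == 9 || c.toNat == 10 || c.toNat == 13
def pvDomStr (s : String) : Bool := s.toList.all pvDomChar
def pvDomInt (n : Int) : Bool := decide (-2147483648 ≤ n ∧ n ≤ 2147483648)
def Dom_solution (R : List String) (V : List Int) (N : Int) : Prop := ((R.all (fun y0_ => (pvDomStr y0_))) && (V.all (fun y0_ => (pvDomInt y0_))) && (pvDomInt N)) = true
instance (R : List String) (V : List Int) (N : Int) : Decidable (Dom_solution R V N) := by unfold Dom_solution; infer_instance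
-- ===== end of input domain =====

-- B replaces A's two mirrored balances and inline minimum updates by one prefix-balance
-- list whose min/max yield both deposits (simpler decomposition, same O(N) cost).

-- ===== PORT A =====
def solStepA (R : List String) (V : List Int) (st : Int × Int × Int × Int) (i : Int) : Int × Int × Int × Int :=
  let v := PySem.List.pyGetD V i 0
  let cA := if PySem.List.pyGetD R i "" = "A" then st.1 + v else st.1 - v
  let cB := if PySem.List.pyGetD R i "" = "A" then st.2.1 - v else st.2.1 + v
  let mA := if cA < st.2.2.1 then cA else st.2.2.1
  let mB := if cB < st.2.2.2 then cB else st.2.2.2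
  (cA, cB, mA, mB)

def solution (R : List String) (V : List Int) (N : Int) : List Int :=
  let st := (PySem.List.pyRange 0 N 1).foldl (solStepA R V) (0, 0, 0, 0)
  [max 0 (-st.2.2.1), max 0 (-st.2.2.2)]

-- ===== PORT B =====
def solStepB (R : List String) (V : List Int) (acc : List Int) (i : Int) : List Int :=
  acc ++ [PySem.List.pyGetD acc (-1) 0 +
          (if PySem.List.pyGetD R i "" = "A" then PySem.List.pyGetD V i 0 else -(PySem.List.pyGetD V i 0))]

def solution_alt (R : List String) (V : List Int) (N : Int) : List Int :=
  let bal := (PySem.List.pyRange 0 N 1).foldl (solStepB R V) [0]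
  [-(PySem.List.min? bal (fun x => x)).getD 0, (PySem.List.max? bal (fun x => x)).getD 0]

-- ===== PRECONDITION & SPEC =====
-- Pre_ excludes exactly the inputs where Python A raises IndexError (an index i < N out of range of R or V).
def Pre_solution (R : List String) (V : List Int) (N : Int) : Prop :=
  N ≤ (R.length : Int) ∧ N ≤ (V.length : Int)
instance (R : List String) (V : List Int) (N : Int) : Decidable (Pre_solution R V N) := by unfold Pre_solution; infer_instance
def pvWitness_solution : List String × List Int × Int := (["A", "B", "A"], [2, 3, 1], 3)

def Spec_solution (R : List String) (V : List Int) (N : Int) (out : List Int) : Prop := out = solution_alt R V N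
instance (R : List String) (V : List Int) (N : Int) (out : List Int) : Decidable (Spec_solution R V N out) := by unfold Spec_solution; infer_instance

-- ===== CLAIM (what is proved, stated in full; the proofs are below) =====
def Claim_equal_solution : Prop := ∀ (R : List String) (V : List Int) (N : Int), Dom_solution R V N → Pre_solution R V N → Spec_solution R V N (solution R V N)

-- ===== LEMMAS AND PROOFS =====

-- the signed step of round i ('A' adds V[i], otherwise subtracts it)
def solDelta (R : List String) (V : List Int) (i : Int) : Int :=
  if PySem.List.pyGetD R i "" = "A" then PySem.List.pyGetD V i 0 else -(PySem.List.pyGetD V i 0)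

-- the running prefix balances produced while consuming the index list L from balance c
def solRun (R : List String) (V : List Int) : List Int → Int → List Int
  | [], _ => []
  | i :: L, c => (c + solDelta R V i) :: solRun R V L (c + solDelta R V i)

theorem solStepA_eq (R : List String) (V : List Int) (c mA mB i : Int) :
    solStepA R V (c, -c, mA, mB) i =
      (c + solDelta R V i, -(c + solDelta R V i),
       min mA (c + solDelta R V i), min mB (-(c + solDelta R V i))) := by
  simp only [solStepA, solDelta]
  split_ifs <;> simp_all <;> omega

theorem foldA (R : List String) (V : List Int) :
    ∀ (L : List Int) (c mA mB : Int),
      L.foldl (solStepA R V) (c, -c, mA, mB) =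
        ((solRun R V L c).getLastD c, -((solRun R V L c).getLastD c),
         (solRun R V L c).foldl min mA,
         ((solRun R V L c).map (fun x => -x)).foldl min mB) := by
  intro L
  induction L with
  | nil => intro c mA mB; simp [solRun]
  | cons i L ih =>
    intro c mA mB
    simp only [List.foldl_cons, solStepA_eq, ih, solRun, List.getLastD_cons, List.map_cons,
      List.foldl_cons]

theorem foldB (R : List String) (V : List Int) :
    ∀ (L : List Int) (pre : List Int) (x : Int),
      L.foldl (solStepB R V) (pre ++ [x]) = pre ++ [x] ++ solRun R V L x := by
  intro L
  induction L with
  | nil => intro pre x; simp [solRun]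
  | cons i L ih =>
    intro pre x
    have hstep : solStepB R V (pre ++ [x]) i = (pre ++ [x]) ++ [x + solDelta R V i] := by
      simp [solStepB, solDelta, PySem.List.pyGetD_neg_one_append_singleton]
    simp only [List.foldl_cons, hstep]
    rw [show (pre ++ [x]) ++ [x + solDelta R V i] = (pre ++ [x]) ++ [x + solDelta R V i] from rfl,
      ih (pre ++ [x]) (x + solDelta R V i)]
    simp [solRun]

theorem foldl_min_le (l : List Int) : ∀ (a : Int), l.foldl min a ≤ a := by
  induction l with
  | nil => intro a; simp
  | cons x l ih => intro a; exact le_trans (ih (min a x)) (min_le_left a x)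

theorem foldl_max_ge (l : List Int) : ∀ (a : Int), a ≤ l.foldl max a := by
  induction l with
  | nil => intro a; simp
  | cons x l ih => intro a; exact le_trans (le_max_left a x) (ih (max a x))

theorem foldl_min_neg (l : List Int) : ∀ (a : Int),
    (l.map (fun x => -x)).foldl min a = -(l.foldl max (-a)) := by
  induction l with
  | nil => intro a; simp
  | cons x l ih =>
    intro a
    simp only [List.map_cons, List.foldl_cons, ih]
    have h : -(min a (-x)) = max (-a) x := by omega
    rw [h]

-- ===== VERDICT (by name: the statement is the Claim_ definition above) =====
theorem solution_spec : Claim_equal_solution := by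
  intro R V N _ _
  unfold Spec_solution solution solution_alt
  have hA := foldA R V (PySem.List.pyRange 0 N 1) 0 0 0
  have hB := foldB R V (PySem.List.pyRange 0 N 1) [] 0
  norm_num at hA
  simp only [List.nil_append, List.cons_append] at hB
  set rs := solRun R V (PySem.List.pyRange 0 N 1) 0 with hrs
  simp only [hA, hB, PySem.List.min?_id_cons, PySem.List.max?_id_cons, Option.getD_some]
  have h1 : rs.foldl min 0 ≤ 0 := foldl_min_le rs 0
  have h2 : (0 : Int) ≤ rs.foldl max 0 := foldl_max_ge rs 0
  have h3 : (rs.map (fun x => -x)).foldl min 0 = -(rs.foldl max 0) := by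
    have := foldl_min_neg rs 0; simpa using this
  rw [h3]
  congr 1
  · omega
  · congr 1
    omega
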